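-- pv_equiv track=rewrite | github.com/52ivepub/CodeWars | algos_78/main.py | sort_the_inner_content
-- ===== SOURCE A (Python) =====
-- def sort_the_inner_content(words):
--     res = []
--     for i in words.split():
--         if len(i) <= 3:
--             res.append(i)
--             continue
--         piece_sort = ''.join(sorted(i[1:-1], reverse=True))
--         i = i[0] + piece_sort + i[-1]
--         res.append(i)
--     return ' '.join(res).strip()
-- ===== SOURCE B (Python) =====
-- def _desc_inner(inner):
--     # counting emission: each ASCII code from high to low, repeated by its multiplicity
--     return ''.join(chr(code) * inner.count(chr(code)) for code in range(127, -1, -1))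
--
--
-- def sort_the_inner_content(words):
--     res = [w if len(w) <= 3 else w[0] + _desc_inner(w[1:-1]) + w[-1]
--            for w in words.split()]
--     return ' '.join(res).strip()
-- ===== Notes on version B (the rewrite author's own statement) =====
-- stated objective: alternative
-- what changed: The per-word interior is rebuilt by counting emission over the descending ASCII code range (each code repeated by its multiplicity in the interior) instead of a comparison sort with reverse=True; the word list is built by a comprehension instead of an append loop.
import Mathlib
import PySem

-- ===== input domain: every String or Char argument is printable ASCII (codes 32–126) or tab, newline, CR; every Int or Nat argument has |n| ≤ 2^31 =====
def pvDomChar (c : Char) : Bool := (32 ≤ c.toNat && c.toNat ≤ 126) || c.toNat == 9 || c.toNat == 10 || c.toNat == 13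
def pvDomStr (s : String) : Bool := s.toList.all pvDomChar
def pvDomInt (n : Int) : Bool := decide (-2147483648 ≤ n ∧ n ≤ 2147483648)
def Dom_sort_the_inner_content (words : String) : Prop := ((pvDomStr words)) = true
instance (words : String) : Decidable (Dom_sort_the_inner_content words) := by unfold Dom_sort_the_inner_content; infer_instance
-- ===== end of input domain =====

-- B replaces the comparison sort of each word's interior by a counting emission over the
-- ASCII code range (descending codes, each repeated by its multiplicity); same split/guard/join framing.

-- ===== PORT A =====
-- ''.join(sorted(i[1:-1], reverse=True)): sorted over the code points of the slice;
-- joining 1-char strings is the char list itself. i[0] / i[-1] are Str.pyGet? (some on the taken branch,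
-- Option.toList keeps them literal without substituting a default).
def sort_the_inner_content (words : String) : String :=
  let res := (PySem.Str.split₀ words).foldl (fun res i =>
    if (PySem.Str.len i : Int) ≤ 3 then res ++ [i]
    else
      let piece_sort := PySem.List.sorted (PySem.List.slice i.toList (some 1) (some (-1))) (fun c => c) true
      let i := String.ofList ((PySem.Str.pyGet? i 0).toList ++ piece_sort ++ (PySem.Str.pyGet? i (-1)).toList)
      res ++ [i]) []
  PySem.Str.strip (PySem.Str.join " " res)

-- ===== PORT B =====
-- ''.join(chr(code) * inner.count(chr(code)) for code in range(127, -1, -1))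
def pvDescInner (inner : List Char) : List Char :=
  (PySem.List.pyRange 127 (-1) (-1)).flatMap
    (fun code => List.replicate (inner.count (Char.ofNat code.toNat)) (Char.ofNat code.toNat))

def sort_the_inner_content_alt (words : String) : String :=
  let res := (PySem.Str.split₀ words).map (fun w =>
    if (PySem.Str.len w : Int) ≤ 3 then w
    else String.ofList ((PySem.Str.pyGet? w 0).toList
          ++ pvDescInner (PySem.List.slice w.toList (some 1) (some (-1)))
          ++ (PySem.Str.pyGet? w (-1)).toList))
  PySem.Str.strip (PySem.Str.join " " res)

-- ===== PRECONDITION & SPEC =====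
def Spec_sort_the_inner_content (words : String) (out : String) : Prop := out = sort_the_inner_content_alt words
instance (words : String) (out : String) : Decidable (Spec_sort_the_inner_content words out) := by unfold Spec_sort_the_inner_content; infer_instance

-- ===== CLAIM (what is proved, stated in full; the proofs are below) =====
def Claim_equal_sort_the_inner_content : Prop := ∀ (words : String), Dom_sort_the_inner_content words → Spec_sort_the_inner_content words (sort_the_inner_content words)

-- ===== LEMMAS AND PROOFS =====

-- proof-side staircase form of pvDescInner
def pvEmitN (xs : List Char) : Nat → List Char
  | 0 => []
  | n + 1 => List.replicate (xs.count (Char.ofNat n)) (Char.ofNat n) ++ pvEmitN xs n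

theorem pvChar_toNat_ofNat (n : Nat) (h : n < 128) : (Char.ofNat n).toNat = n := by
  rw [Char.toNat_ofNat, if_pos (Or.inl (by omega))]

theorem pvDescInner_emitN_aux (xs : List Char) (n : Nat) (hn : n ≤ 128) :
    (PySem.List.pyRange ((n : Int) - 1) (-1) (-1)).flatMap
      (fun code => List.replicate (xs.count (Char.ofNat code.toNat)) (Char.ofNat code.toNat))
      = pvEmitN xs n := by
  induction n with
  | zero =>
    rw [show ((0 : Nat) : Int) - 1 = -1 by norm_num,
      PySem.List.pyRange_neg_one_eq_nil (le_refl (-1))]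
    simp [pvEmitN]
  | succ m ih =>
    have h0 : ((m + 1 : Nat) : Int) - 1 = (m : Int) := by push_cast; ring
    rw [h0, PySem.List.pyRange_neg_one_cons (by omega), List.flatMap_cons,
      show (m : Int) - 1 = ((m : Nat) : Int) - 1 from rfl, ih (by omega)]
    simp [pvEmitN]

theorem pvDescInner_eq_emitN (xs : List Char) : pvDescInner xs = pvEmitN xs 128 := by
  have := pvDescInner_emitN_aux xs 128 le_rfl
  unfold pvDescInner
  norm_num at this ⊢
  exact this

theorem count_pvEmitN (xs : List Char) (n : Nat) (hn : n ≤ 128) (c : Char) :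
    (pvEmitN xs n).count c = if c.toNat < n then xs.count c else 0 := by
  induction n with
  | zero => simp [pvEmitN]
  | succ m ih =>
    rw [pvEmitN, List.count_append, List.count_replicate, ih (by omega)]
    by_cases hm : Char.ofNat m = c
    · have hc : c.toNat = m := by rw [← hm, pvChar_toNat_ofNat m (by omega)]
      simp [hm, hc]
    · have hc : c.toNat ≠ m := by
        intro h
        exact hm (by rw [← h, Char.ofNat_toNat])
      by_cases hlt : c.toNat < m
      · simp [hm, hlt, show c.toNat < m + 1 by omega]
      · simp [hm, hlt, show ¬ c.toNat < m + 1 by omega]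

theorem pvEmitN_desc (xs : List Char) (n : Nat) (hn : n ≤ 128) :
    (pvEmitN xs n).Pairwise (fun a b => b ≤ a) ∧ ∀ c ∈ pvEmitN xs n, c.toNat < n := by
  induction n with
  | zero => simp [pvEmitN]
  | succ m ih =>
    obtain ⟨hp, hb⟩ := ih (by omega)
    constructor
    · rw [pvEmitN, List.pairwise_append]
      refine ⟨List.pairwise_replicate.mpr (Or.inr le_rfl), hp, ?_⟩
      intro a ha b hb'
      have ha' : a = Char.ofNat m := List.eq_of_mem_replicate ha
      have : b.toNat ≤ a.toNat := by
        rw [ha', pvChar_toNat_ofNat m (by omega)]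
        exact Nat.le_of_lt (hb b hb')
      exact Char.le_def.mpr (UInt32.le_iff_toNat_le.mpr this)
    · intro c hc
      rw [pvEmitN, List.mem_append] at hc
      rcases hc with hc | hc
      · rw [List.eq_of_mem_replicate hc, pvChar_toNat_ofNat m (by omega)]
        omega
      · exact Nat.lt_succ_of_lt (hb c hc)

theorem sorted_eq_pvDescInner (xs : List Char) (h : ∀ c ∈ xs, c.toNat < 128) :
    PySem.List.sorted xs (fun c => c) true = pvDescInner xs := by
  rw [pvDescInner_eq_emitN]
  have hperm : (PySem.List.sorted xs (fun c => c) true).Perm (pvEmitN xs 128) := by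
    refine (PySem.List.sorted_perm xs _ _).trans (List.perm_iff_count.mpr fun c => ?_)
    rw [count_pvEmitN xs 128 le_rfl c]
    by_cases hc : c.toNat < 128
    · simp [hc]
    · rw [if_neg hc, List.count_eq_zero]
      intro hmem
      exact hc (h c hmem)
  obtain ⟨hp2, _⟩ := pvEmitN_desc xs 128 le_rfl
  have hkey : ∀ (l : List Char), l.Pairwise (fun a b => b ≤ a) →
      l.Pairwise (fun a b => (fun c : Char => -(c.toNat : Int)) a ≤ (fun c : Char => -(c.toNat : Int)) b) := by
    intro l hl
    refine hl.imp ?_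
    intro a b hba
    have h2 : b.toNat ≤ a.toNat := UInt32.le_iff_toNat_le.mp (Char.le_def.mp hba)
    show -(a.toNat : Int) ≤ -(b.toNat : Int)
    omega
  refine PySem.List.eq_of_perm_of_pairwise_le_of_injective (fun c : Char => -(c.toNat : Int)) ?_ hperm
      (hkey _ (PySem.List.sorted_pairwise_rev xs _)) (hkey _ hp2)
  intro a b hab
  have : a.toNat = b.toNat := by simpa using hab
  rw [← Char.ofNat_toNat a, this, Char.ofNat_toNat]

theorem split₀_go_chars (s : List Char) : ∀ (cur : List Char) (acc : List (List Char)) (w : List Char) (c : Char),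
    w ∈ PySem.Chars.split₀.go s cur acc → c ∈ w →
    c ∈ s ∨ c ∈ cur ∨ ∃ a ∈ acc, c ∈ a := by
  induction s with
  | nil =>
    intro cur acc w c hw hc
    rw [PySem.Chars.split₀.go] at hw
    split at hw
    · exact Or.inr (Or.inr ⟨w, List.mem_reverse.mp hw, hc⟩)
    · rw [List.mem_reverse] at hw
      rcases List.mem_cons.mp hw with rfl | hw
      · exact Or.inr (Or.inl (List.mem_reverse.mp hc))
      · exact Or.inr (Or.inr ⟨w, hw, hc⟩)
  | cons x rest ih =>
    intro cur acc w c hw hc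
    rw [PySem.Chars.split₀.go] at hw
    split at hw
    · split at hw
      · rcases ih [] acc w c hw hc with h | h | h
        · exact Or.inl (List.mem_cons_of_mem _ h)
        · simp at h
        · exact Or.inr (Or.inr h)
      · rcases ih [] (cur.reverse :: acc) w c hw hc with h | h | h
        · exact Or.inl (List.mem_cons_of_mem _ h)
        · simp at h
        · rcases h with ⟨a, ha, hca⟩
          rcases List.mem_cons.mp ha with rfl | ha
          · exact Or.inr (Or.inl (List.mem_reverse.mp hca))
          · exact Or.inr (Or.inr ⟨a, ha, hca⟩)
    · rcases ih (x :: cur) acc w c hw hc with h | h | h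
      · exact Or.inl (List.mem_cons_of_mem _ h)
      · rcases List.mem_cons.mp h with rfl | h
        · exact Or.inl (List.mem_cons_self)
        · exact Or.inr (Or.inl h)
      · exact Or.inr (Or.inr h)

theorem split₀_chars (s : String) (w : String) (hw : w ∈ PySem.Str.split₀ s) (c : Char)
    (hc : c ∈ w.toList) : c ∈ s.toList := by
  have hw' : w.toList ∈ PySem.Chars.split₀ s.toList := by
    rw [← PySem.Str.split₀_map_toList]
    exact List.mem_map_of_mem hw
  rcases split₀_go_chars s.toList [] [] w.toList c hw' hc with h | h | ⟨a, ha, _⟩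
  · exact h
  · simp at h
  · simp at ha

theorem foldA_eq_map (ws : List String)
    (h : ∀ w ∈ ws, ∀ c ∈ w.toList, c.toNat < 128) : ∀ res : List String,
    ws.foldl (fun res i =>
      if (PySem.Str.len i : Int) ≤ 3 then res ++ [i]
      else
        let piece_sort := PySem.List.sorted (PySem.List.slice i.toList (some 1) (some (-1))) (fun c => c) true
        let i := String.ofList ((PySem.Str.pyGet? i 0).toList ++ piece_sort ++ (PySem.Str.pyGet? i (-1)).toList)
        res ++ [i]) res
    = res ++ ws.map (fun w =>
      if (PySem.Str.len w : Int) ≤ 3 then w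
      else String.ofList ((PySem.Str.pyGet? w 0).toList
            ++ pvDescInner (PySem.List.slice w.toList (some 1) (some (-1)))
            ++ (PySem.Str.pyGet? w (-1)).toList)) := by
  induction ws with
  | nil => intro res; simp
  | cons w ws ih =>
    intro res
    rw [List.foldl_cons, List.map_cons,
      ih (fun x hx => h x (List.mem_cons_of_mem _ hx))]
    show (if (PySem.Str.len w : Int) ≤ 3 then res ++ [w] else _) ++ _ = _
    have hsort : PySem.List.sorted (PySem.List.slice w.toList (some 1) (some (-1))) (fun c => c) true
        = pvDescInner (PySem.List.slice w.toList (some 1) (some (-1))) :=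
      sorted_eq_pvDescInner _ (fun c hc =>
        h w List.mem_cons_self c (PySem.List.mem_of_mem_slice _ _ _ hc))
    by_cases hlen : (PySem.Str.len w : Int) ≤ 3
    · rw [if_pos hlen, if_pos hlen]
      simp
    · rw [if_neg hlen, if_neg hlen]
      simp only [hsort]
      simp

-- ===== VERDICT (by name: the statement is the Claim_ definition above) =====
theorem sort_the_inner_content_spec : Claim_equal_sort_the_inner_content := by
  intro words hdom
  unfold Spec_sort_the_inner_content sort_the_inner_content sort_the_inner_content_alt
  have hchars : ∀ w ∈ PySem.Str.split₀ words, ∀ c ∈ w.toList, c.toNat < 128 := by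
    intro w hw c hc
    have hmem : c ∈ words.toList := split₀_chars words w hw c hc
    have hd : pvDomChar c = true := by
      have := hdom
      unfold Dom_sort_the_inner_content pvDomStr at this
      exact List.all_eq_true.mp this c hmem
    unfold pvDomChar at hd
    simp at hd
    omega
  rw [foldA_eq_map (PySem.Str.split₀ words) hchars []]
  simp
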